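-- pv_equiv track=rewrite | github.com/puppytag/His2Trans | data/ohos/ohos_root_min/drivers/hdf_core/framework/tools/hdf_dev_eco_tool/command_line/driver_add/liteos/gn_file_add_config.py | find_build_file_end_index
-- ===== SOURCE A (Python) =====
-- def find_build_file_end_index(date_lines, model_name, pre_str='FRAMEWORKS'):
--     state = False
--     end_index = 0
--     frameworks_model_name = "%s_%s_ROOT" % (pre_str, model_name.upper())
--     frameworks_model_value = ''
--     for index, line in enumerate(date_lines):
--         if line.startswith("#"):
--             continue
--         elif line.find("hdf_driver") != -1:
--             state = True
--             continue
--         elif line.startswith("}") and state: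
--             end_index = index
--             state = False
--         elif line.strip().startswith(frameworks_model_name):
--             frameworks_model_value = line.split("=")[-1].strip()
--         else:
--             continue
--     result_tuple = (end_index, frameworks_model_name, frameworks_model_value)
--     return result_tuple
-- ===== SOURCE B (Python) =====
-- def find_build_file_end_index(date_lines, model_name, pre_str='FRAMEWORKS'):
--     name = "%s_%s_ROOT" % (pre_str, model_name.upper())
--     end_index = 0
--     armed = False
--     for index, line in enumerate(date_lines):
--         if line.startswith("#"):
--             continue
--         if "hdf_driver" in line:
--             armed = True
--         elif armed and line.startswith("}"):
--             end_index = index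
--             armed = False
--     value = ''
--     for line in date_lines:
--         if line.startswith("#") or "hdf_driver" in line:
--             continue
--         if line.strip().startswith(name):
--             value = line.split("=")[-1].strip()
--     return (end_index, name, value)
-- ===== Notes on version B (the rewrite author's own statement) =====
-- stated objective: alternative
-- what changed: Splits A's single stateful if/elif cascade into two independent passes: a stateful scan that finds the end index of the hdf_driver block, and a stateless scan (skipping comment and hdf_driver lines) that records the frameworks value; Pre_ excludes inputs containing a line that both begins with '}' and, stripped, begins with the frameworks name (only possible when pre_str begins with '}'), where A's branch precedence makes recording the value depend on transient state.
import Mathlib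
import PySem

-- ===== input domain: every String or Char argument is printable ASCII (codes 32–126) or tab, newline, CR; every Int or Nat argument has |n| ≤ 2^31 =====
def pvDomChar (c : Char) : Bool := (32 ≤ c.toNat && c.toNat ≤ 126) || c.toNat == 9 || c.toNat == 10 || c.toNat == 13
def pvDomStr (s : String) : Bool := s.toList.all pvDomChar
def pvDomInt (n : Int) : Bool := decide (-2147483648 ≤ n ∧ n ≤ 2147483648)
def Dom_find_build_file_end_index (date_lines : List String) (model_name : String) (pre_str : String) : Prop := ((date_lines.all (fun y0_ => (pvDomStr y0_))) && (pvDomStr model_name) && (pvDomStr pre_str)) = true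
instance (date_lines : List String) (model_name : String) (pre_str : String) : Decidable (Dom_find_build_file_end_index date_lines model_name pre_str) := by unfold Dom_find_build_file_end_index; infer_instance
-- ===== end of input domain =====

-- B splits A's single stateful if/elif cascade into two independent passes (a stateful
-- end-index scan and a stateless value scan); same cost, plainer decomposition.


-- ===== PORT A =====
-- line.split("=")[-1].strip()  (the separator "=" is nonempty so split? is some, and a split result is never [], so both getD defaults are unreachable)
def pvSplitVal (line : String) : String :=
  PySem.Str.strip ((PySem.List.pyGet? ((PySem.Str.split? line "=").getD []) (-1)).getD "")

-- the 'for index, line in enumerate(date_lines)' loop of A, carrying (state, end_index, frameworks_model_value)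
def pvALoop (name : String) : List String → Int → Bool → Int → String → Int × String
  | [], _, _, e, v => (e, v)
  | line :: rest, i, s, e, v =>
    if PySem.Str.startswith line "#" then pvALoop name rest (i+1) s e v
    else if PySem.Str.find line "hdf_driver" ≠ -1 then pvALoop name rest (i+1) true e v
    else if PySem.Str.startswith line "}" && s then pvALoop name rest (i+1) false i v
    else if PySem.Str.startswith (PySem.Str.strip line) name then pvALoop name rest (i+1) s e (pvSplitVal line)
    else pvALoop name rest (i+1) s e v

def find_build_file_end_index (date_lines : List String) (model_name : String) (pre_str : String) : Int × String × String :=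
  let name := pre_str ++ "_" ++ PySem.Str.upper model_name ++ "_ROOT"
  let r := pvALoop name date_lines 0 false 0 ""
  (r.1, name, r.2)

-- ===== PORT B =====
-- first pass of Source B: find the end index of the hdf_driver block
def pvBEnd : List String → Int → Bool → Int → Int
  | [], _, _, e => e
  | line :: rest, i, armed, e =>
    if PySem.Str.startswith line "#" then pvBEnd rest (i+1) armed e
    else if PySem.Str.isIn "hdf_driver" line then pvBEnd rest (i+1) true e
    else if armed && PySem.Str.startswith line "}" then pvBEnd rest (i+1) false i
    else pvBEnd rest (i+1) armed e

-- second pass of Source B: record the frameworks value, skipping comment and hdf_driver lines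
def pvBVal (name : String) : List String → String → String
  | [], v => v
  | line :: rest, v =>
    if PySem.Str.startswith line "#" || PySem.Str.isIn "hdf_driver" line then pvBVal name rest v
    else if PySem.Str.startswith (PySem.Str.strip line) name then pvBVal name rest (pvSplitVal line)
    else pvBVal name rest v

def find_build_file_end_index_alt (date_lines : List String) (model_name : String) (pre_str : String) : Int × String × String :=
  let name := pre_str ++ "_" ++ PySem.Str.upper model_name ++ "_ROOT"
  (pvBEnd date_lines 0 false 0, name, pvBVal name date_lines "")

-- ===== PRECONDITION & SPEC =====
-- Pre_ excludes inputs containing a line that both begins with "}" and, stripped, begins with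
-- the frameworks name (only possible when pre_str begins with "}"): there A's branch precedence
-- makes recording the value depend on transient state, an accidental corner.
def Pre_find_build_file_end_index (date_lines : List String) (model_name : String) (pre_str : String) : Prop :=
  (date_lines.all (fun line =>
    !(PySem.Str.startswith line "}" &&
      PySem.Str.startswith (PySem.Str.strip line) (pre_str ++ "_" ++ PySem.Str.upper model_name ++ "_ROOT")))) = true
instance (date_lines : List String) (model_name : String) (pre_str : String) : Decidable (Pre_find_build_file_end_index date_lines model_name pre_str) := by unfold Pre_find_build_file_end_index; infer_instance

def pvWitness_find_build_file_end_index : List String × String × String :=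
  (["# comment", "hdf_driver {", "  FRAMEWORKS_M_ROOT = //a/b", "}"], "m", "FRAMEWORKS")

def Spec_find_build_file_end_index (date_lines : List String) (model_name : String) (pre_str : String) (out : Int × String × String) : Prop := out = find_build_file_end_index_alt date_lines model_name pre_str
instance (date_lines : List String) (model_name : String) (pre_str : String) (out : Int × String × String) : Decidable (Spec_find_build_file_end_index date_lines model_name pre_str out) := by unfold Spec_find_build_file_end_index; infer_instance

-- ===== CLAIM (what is proved, stated in full; the proofs are below) =====
def Claim_equal_find_build_file_end_index : Prop := ∀ (date_lines : List String) (model_name : String) (pre_str : String), Dom_find_build_file_end_index date_lines model_name pre_str → Pre_find_build_file_end_index date_lines model_name pre_str → Spec_find_build_file_end_index date_lines model_name pre_str (find_build_file_end_index date_lines model_name pre_str)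

-- ===== LEMMAS AND PROOFS =====
lemma pvMain (name : String) (ls : List String)
    (h : ∀ l ∈ ls, ¬(PySem.Chars.startswith l.toList ['}'] = true ∧
        PySem.Chars.startswith (PySem.Chars.strip l.toList) name.toList = true)) :
    ∀ (i e : Int) (s : Bool) (v : String),
      pvALoop name ls i s e v = (pvBEnd ls i s e, pvBVal name ls v) := by
  induction ls with
  | nil => intro i e s v; simp [pvALoop, pvBEnd, pvBVal]
  | cons line rest ih =>
    intro i e s v
    have hrest := fun l hl => h l (List.mem_cons_of_mem _ hl)
    have hline := h line (List.mem_cons_self ..)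
    by_cases h1 : PySem.Chars.startswith line.toList ['#'] = true
    · simp [pvALoop, pvBEnd, pvBVal, PySem.Str.startswith, PySem.Str.isIn, h1, ih hrest]
    · by_cases h2 : PySem.Chars.isIn ['h','d','f','_','d','r','i','v','e','r'] line.toList = true
      · have h2' : ¬ PySem.Chars.find line.toList ['h','d','f','_','d','r','i','v','e','r'] = -1 := by
          rw [PySem.Chars.find_eq_neg_one_iff]
          exact fun hn => hn ((PySem.Chars.isIn_iff_infix _ _).mp h2)
        simp [pvALoop, pvBEnd, pvBVal, PySem.Str.startswith, PySem.Str.find, PySem.Str.isIn,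
          h1, h2, h2', ih hrest]
      · have h2' : PySem.Chars.find line.toList ['h','d','f','_','d','r','i','v','e','r'] = -1 := by
          rw [PySem.Chars.find_eq_neg_one_iff]
          exact fun hinf => h2 ((PySem.Chars.isIn_iff_infix _ _).mpr hinf)
        by_cases h3 : PySem.Chars.startswith line.toList ['}'] = true
        · have h4 : ¬ PySem.Chars.startswith (PySem.Chars.strip line.toList) name.toList = true :=
            fun hc => hline ⟨h3, hc⟩
          cases s <;>
            simp [pvALoop, pvBEnd, pvBVal, PySem.Str.startswith, PySem.Str.find, PySem.Str.isIn,
              PySem.Str.strip, h1, h2, h2', h3, h4, ih hrest]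
        · by_cases h4 : PySem.Chars.startswith (PySem.Chars.strip line.toList) name.toList = true <;>
            simp [pvALoop, pvBEnd, pvBVal, PySem.Str.startswith, PySem.Str.find, PySem.Str.isIn,
              PySem.Str.strip, h1, h2, h2', h3, h4, ih hrest]

-- ===== VERDICT (by name: the statement is the Claim_ definition above) =====
theorem find_build_file_end_index_spec : Claim_equal_find_build_file_end_index := by
  intro date_lines model_name pre_str _ hpre
  unfold Spec_find_build_file_end_index find_build_file_end_index find_build_file_end_index_alt
  have h : ∀ l ∈ date_lines, ¬(PySem.Chars.startswith l.toList ['}'] = true ∧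
      PySem.Chars.startswith (PySem.Chars.strip l.toList)
        (pre_str ++ "_" ++ PySem.Str.upper model_name ++ "_ROOT").toList = true) := by
    intro l hl hc
    have h0 := List.all_eq_true.mp hpre l hl
    simp [PySem.Str.startswith, PySem.Str.strip, PySem.Str.upper] at h0 hc
    rcases h0 with h0 | h0 <;> simp [h0] at hc
  simp [pvMain _ _ h]
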